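-- pv_equiv track=rewrite | github.com/KumarRitwick/PyhtonAssignment1 | T2.py | getAllAbbIndicesAndWgts
-- ===== SOURCE A (Python) =====
-- def getAllAbbIndicesAndWgts(weights):
--     pairs = []
--     for i, w1 in enumerate(weights):
--         for j, w2 in enumerate(weights):
--             if j<=i or w1 == -1 or w2 == -1:
--                 continue
--             pairs.append((i, j, w1 + w2))
--     return pairs
-- ===== SOURCE B (Python) =====
-- def getAllAbbIndicesAndWgts(weights):
--     # Single backward pass: walk the list right-to-left, maintaining the valid
--     # (index, weight) entries seen so far (in descending index order); each valid
--     # element contributes its row of pairs against them; the rows, reversed once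
--     # at the end, come out in A's order.
--     suffix = []
--     rows = []
--     for i, w in reversed(list(enumerate(weights))):
--         if w != -1:
--             rows.append([(i, j, w + w2) for j, w2 in reversed(suffix)])
--             suffix.append((i, w))
--     rows.reverse()
--     return [p for row in rows for p in row]
-- ===== Notes on version B (the rewrite author's own statement) =====
-- stated objective: alternative
-- what changed: Replaced A's nested n-by-n scan with a j<=i-or-invalid guard by a single backward pass with an accumulator: walking right-to-left it maintains the valid (index, weight) suffix seen so far, emits each valid element's row of pairs against that suffix, and reverses the collected rows once at the end, so the lower triangle and invalid entries are never visited.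
import Mathlib
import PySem

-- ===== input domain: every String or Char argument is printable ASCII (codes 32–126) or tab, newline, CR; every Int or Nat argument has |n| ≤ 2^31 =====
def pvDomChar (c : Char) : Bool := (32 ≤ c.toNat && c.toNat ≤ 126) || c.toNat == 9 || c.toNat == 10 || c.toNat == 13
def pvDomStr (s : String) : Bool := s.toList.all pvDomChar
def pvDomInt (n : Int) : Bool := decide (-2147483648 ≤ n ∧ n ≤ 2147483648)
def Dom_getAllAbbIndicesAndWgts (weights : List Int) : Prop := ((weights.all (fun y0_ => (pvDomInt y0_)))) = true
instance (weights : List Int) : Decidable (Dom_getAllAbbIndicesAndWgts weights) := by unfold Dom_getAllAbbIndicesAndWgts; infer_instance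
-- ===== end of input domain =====

-- B replaces A's nested n×n scan with one backward pass that maintains the valid
-- (index, weight) suffix and prepends each element's row of pairs; alternative decomposition, same results.

-- ===== PORT A =====
def getAllAbbIndicesAndWgts (weights : List Int) : List (Int × Int × Int) :=
  (PySem.List.enumerate weights).foldl (fun pairs iw1 =>
    (PySem.List.enumerate weights).foldl (fun pairs jw2 =>
      if jw2.1 ≤ iw1.1 ∨ iw1.2 = -1 ∨ jw2.2 = -1 then pairs
      else pairs ++ [(iw1.1, jw2.1, iw1.2 + jw2.2)]) pairs) []

-- ===== PORT B =====
-- Source B's backward loop over reversed(list(enumerate(weights))) with state (suffix, rows),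
-- ported as a foldr over the enumerated list (a right fold IS the backward pass);
-- rows.reverse + flattening comprehension at the end as in Source B.
def getAllAbbIndicesAndWgts_alt (weights : List Int) : List (Int × Int × Int) :=
  (((PySem.List.enumerate weights).foldr
    (fun iw (st : List (Int × Int) × List (List (Int × Int × Int))) =>
      if iw.2 ≠ -1 then
        (st.1 ++ [iw], st.2 ++ [st.1.reverse.map (fun jw => (iw.1, jw.1, iw.2 + jw.2))])
      else st)
    ([], [])).2).reverse.flatten

-- ===== PRECONDITION & SPEC =====
def Spec_getAllAbbIndicesAndWgts (weights : List Int) (out : List (Int × Int × Int)) : Prop := out = getAllAbbIndicesAndWgts_alt weights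
instance (weights : List Int) (out : List (Int × Int × Int)) : Decidable (Spec_getAllAbbIndicesAndWgts weights out) := by unfold Spec_getAllAbbIndicesAndWgts; infer_instance

-- ===== CLAIM (what is proved, stated in full; the proofs are below) =====
def Claim_equal_getAllAbbIndicesAndWgts : Prop := ∀ (weights : List Int), Dom_getAllAbbIndicesAndWgts weights → Spec_getAllAbbIndicesAndWgts weights (getAllAbbIndicesAndWgts weights)

-- ===== LEMMAS AND PROOFS =====

-- common intermediate form: head paired with every later entry, then the tail
def pvTailPairs : List (Int × Int) → List (Int × Int × Int)
  | [] => []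
  | iw :: rest => rest.map (fun jw => (iw.1, jw.1, iw.2 + jw.2)) ++ pvTailPairs rest

-- A's inner body as a filter-map over the inner list E
def pvInner (E : List (Int × Int)) (iw : Int × Int) : List (Int × Int × Int) :=
  (E.filter (fun jw => !(decide (jw.1 ≤ iw.1 ∨ iw.2 = -1 ∨ jw.2 = -1)))).map
    (fun jw => (iw.1, jw.1, iw.2 + jw.2))

lemma pv_inner_fold (E : List (Int × Int)) (iw : Int × Int) (acc : List (Int × Int × Int)) :
    E.foldl (fun pairs jw =>
      if jw.1 ≤ iw.1 ∨ iw.2 = -1 ∨ jw.2 = -1 then pairs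
      else pairs ++ [(iw.1, jw.1, iw.2 + jw.2)]) acc = acc ++ pvInner E iw := by
  have h : (fun (pairs : List (Int × Int × Int)) (jw : Int × Int) =>
      if jw.1 ≤ iw.1 ∨ iw.2 = -1 ∨ jw.2 = -1 then pairs
      else pairs ++ [(iw.1, jw.1, iw.2 + jw.2)]) =
      (fun pairs jw =>
      if ¬(jw.1 ≤ iw.1 ∨ iw.2 = -1 ∨ jw.2 = -1) then pairs ++ [(iw.1, jw.1, iw.2 + jw.2)]
      else pairs) := by
    funext pairs jw; by_cases h : jw.1 ≤ iw.1 ∨ iw.2 = -1 ∨ jw.2 = -1 <;> simp [h]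
  rw [h, PySem.List.foldl_append_ite]
  unfold pvInner
  congr 1
  congr 1
  apply List.filter_congr
  intro x _
  rw [Bool.eq_iff_iff]
  simp

lemma pv_flatMap (E : List (Int × Int)) (hE : E.Pairwise (fun p q => p.1 < q.1)) :
    E.flatMap (pvInner E) = pvTailPairs (E.filter (fun iw => iw.2 != -1)) := by
  induction E with
  | nil => simp [pvTailPairs]
  | cons e rest ih =>
    rw [List.pairwise_cons] at hE
    obtain ⟨he, hrest⟩ := hE
    have hhead : pvInner (e :: rest) e =
        if e.2 = -1 then [] else
          (rest.filter (fun iw => iw.2 != -1)).map (fun jw => (e.1, jw.1, e.2 + jw.2)) := by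
      unfold pvInner
      by_cases h2 : e.2 = -1
      · simp [h2]
      · have hf : List.filter (fun jw => !decide (jw.1 ≤ e.1) && !decide (jw.2 = -1)) rest
            = List.filter (fun iw => iw.2 != -1) rest := by
          apply List.filter_congr
          intro x hx
          have hle : ¬ x.1 ≤ e.1 := not_le.mpr (he x hx)
          rw [Bool.eq_iff_iff]
          simp [hle, bne]
        simp [h2, hf]
    have htail : rest.flatMap (pvInner (e :: rest)) = rest.flatMap (pvInner rest) := by
      apply List.flatMap_congr
      intro iw hiw
      unfold pvInner
      rw [List.filter_cons]
      have := he iw hiw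
      simp [le_of_lt this]
    rw [List.flatMap_cons, hhead, htail, ih hrest, List.filter_cons]
    by_cases h2 : e.2 = -1 <;> simp [h2, pvTailPairs]

-- B's backward pass: suffix is the reversed valid filter, and the reversed,
-- flattened rows are exactly pvTailPairs of the valid filter
lemma pv_alt_state (E : List (Int × Int)) :
    (E.foldr (fun iw (st : List (Int × Int) × List (List (Int × Int × Int))) =>
      if iw.2 ≠ -1 then
        (st.1 ++ [iw], st.2 ++ [st.1.reverse.map (fun jw => (iw.1, jw.1, iw.2 + jw.2))])
      else st) ([], [])).1 = (E.filter (fun iw => iw.2 != -1)).reverse ∧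
    ((E.foldr (fun iw (st : List (Int × Int) × List (List (Int × Int × Int))) =>
      if iw.2 ≠ -1 then
        (st.1 ++ [iw], st.2 ++ [st.1.reverse.map (fun jw => (iw.1, jw.1, iw.2 + jw.2))])
      else st) ([], [])).2).reverse.flatten = pvTailPairs (E.filter (fun iw => iw.2 != -1)) := by
  induction E with
  | nil => simp [pvTailPairs]
  | cons e rest ih =>
    obtain ⟨ih1, ih2⟩ := ih
    rw [List.foldr_cons, List.filter_cons]
    by_cases h2 : e.2 = -1
    · have hf : ((e.2 != -1) : Bool) = false := by simp [bne, h2]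
      rw [if_neg (by simpa using h2), hf]
      exact ⟨ih1, ih2⟩
    · have hf : ((e.2 != -1) : Bool) = true := by simp [bne, h2]
      rw [if_pos (by simpa using h2), hf]
      refine ⟨?_, ?_⟩
      · rw [ih1, if_pos rfl, List.reverse_cons]
      · rw [ih1, if_pos rfl, List.reverse_reverse]
        show (_ ++ [_]).reverse.flatten = _
        rw [List.reverse_append, List.reverse_singleton, List.singleton_append,
          List.flatten_cons, ih2, pvTailPairs]

-- ===== VERDICT (by name: the statement is the Claim_ definition above) =====
theorem getAllAbbIndicesAndWgts_spec : Claim_equal_getAllAbbIndicesAndWgts := by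
  intro weights _
  show getAllAbbIndicesAndWgts weights = getAllAbbIndicesAndWgts_alt weights
  unfold getAllAbbIndicesAndWgts getAllAbbIndicesAndWgts_alt
  have h1 : (fun (pairs : List (Int × Int × Int)) (iw1 : Int × Int) =>
      (PySem.List.enumerate weights).foldl (fun pairs jw2 =>
        if jw2.1 ≤ iw1.1 ∨ iw1.2 = -1 ∨ jw2.2 = -1 then pairs
        else pairs ++ [(iw1.1, jw2.1, iw1.2 + jw2.2)]) pairs) =
      (fun pairs iw1 => pairs ++ pvInner (PySem.List.enumerate weights) iw1) := by
    funext pairs iw1; exact pv_inner_fold _ _ _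
  rw [h1, PySem.List.foldl_append_eq_flatMap, (pv_alt_state (PySem.List.enumerate weights)).2]
  simpa using pv_flatMap _ (PySem.List.pairwise_lt_enumerate weights 0)
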